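-- pv_equiv track=rewrite | github.com/Andrurachi/Python-exercises | 42_ejercicio_cuarentaydos.py | recursiva_union
-- ===== SOURCE A (Python) =====
-- def recursiva_union(c_uno,i,c_dos,j):
--     if j == 0:
--         c= []
--         for n in range(i):
--             c.append(c_uno[n])
--         return c
--     elif i == 0:
--         c = []
--         for n in range(j):
--             c.append(c_dos[n])
--         return c
--     elif (c_uno[i-1] == c_dos[j-1]):
--         c = recursiva_union(c_uno,i-1,c_dos,j-1)
--         c.append(c_uno[i-1])
--         return c
--     elif c_uno[i-1] < c_dos[j-1]:
--         c = recursiva_union(c_uno,i,c_dos,j-1)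
--         c.append(c_dos[j-1])
--         return c
--     else:
--         c = recursiva_union(c_uno,i-1,c_dos,j)
--         c.append(c_uno[i-1])
--         return c
-- ===== SOURCE B (Python) =====
-- def recursiva_union(c_uno, i, c_dos, j):
--     acc = []
--     p, q = i, j
--     while p > 0 and q > 0:
--         a, b = c_uno[p - 1], c_dos[q - 1]
--         if a == b:
--             acc.append(a)
--             p -= 1
--             q -= 1
--         elif a < b:
--             acc.append(b)
--             q -= 1
--         else:
--             acc.append(a)
--             p -= 1
--     head = []
--     if q <= 0:
--         for n in range(p):
--             head.append(c_uno[n])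
--     else:
--         for n in range(q):
--             head.append(c_dos[n])
--     acc.reverse()
--     return head + acc
-- ===== Notes on version B (the rewrite author's own statement) =====
-- stated objective: alternative
-- what changed: Replaces A's backward recursion (one Python call frame and list rebuild per element) with an iterative backward two-pointer loop that appends to one accumulator and reverses it once at the end.
-- outside the precondition, e.g. on recursiva_union([-4, 4, 0, -1], -1, [-4], 1): A returns [-4, 4, 0], B returns [-4]
import Mathlib
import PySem

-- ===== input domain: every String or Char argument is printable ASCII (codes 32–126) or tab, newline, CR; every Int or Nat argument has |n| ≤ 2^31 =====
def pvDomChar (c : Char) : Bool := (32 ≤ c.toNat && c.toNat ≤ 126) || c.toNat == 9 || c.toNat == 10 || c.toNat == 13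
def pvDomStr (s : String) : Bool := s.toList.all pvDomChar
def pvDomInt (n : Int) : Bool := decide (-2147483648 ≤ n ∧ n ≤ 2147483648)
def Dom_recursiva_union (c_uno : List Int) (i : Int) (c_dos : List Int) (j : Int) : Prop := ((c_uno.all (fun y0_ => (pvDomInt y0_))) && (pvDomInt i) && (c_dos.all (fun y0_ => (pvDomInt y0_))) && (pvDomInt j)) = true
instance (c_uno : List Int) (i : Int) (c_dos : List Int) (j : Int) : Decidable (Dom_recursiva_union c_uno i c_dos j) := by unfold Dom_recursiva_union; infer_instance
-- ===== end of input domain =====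

-- B replaces A's backward recursion with an iterative backward two-pointer merge (one accumulator, reversed once at the end); same return values on in-range i, j.


-- ===== PORT A =====
-- Literal port of A's recursion; `fuel` only makes the recursion total (inside Pre_ it never runs out).
def pvAgo (fuel : Nat) (c_uno : List Int) (i : Int) (c_dos : List Int) (j : Int) : List Int :=
  match fuel with
  | 0 => []
  | Nat.succ f =>
    if j = 0 then
      (PySem.List.pyRange 0 i 1).foldl (fun c n => c ++ [PySem.List.pyGetD c_uno n 0]) []
    else if i = 0 then
      (PySem.List.pyRange 0 j 1).foldl (fun c n => c ++ [PySem.List.pyGetD c_dos n 0]) []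
    else if PySem.List.pyGetD c_uno (i-1) 0 = PySem.List.pyGetD c_dos (j-1) 0 then
      pvAgo f c_uno (i-1) c_dos (j-1) ++ [PySem.List.pyGetD c_uno (i-1) 0]
    else if PySem.List.pyGetD c_uno (i-1) 0 < PySem.List.pyGetD c_dos (j-1) 0 then
      pvAgo f c_uno i c_dos (j-1) ++ [PySem.List.pyGetD c_dos (j-1) 0]
    else
      pvAgo f c_uno (i-1) c_dos j ++ [PySem.List.pyGetD c_uno (i-1) 0]

def recursiva_union (c_uno : List Int) (i : Int) (c_dos : List Int) (j : Int) : List Int :=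
  pvAgo (i.toNat + j.toNat + 1) c_uno i c_dos j

-- ===== PORT B =====
-- the while loop of Source B: backward two-pointer merge into acc
def pvBgo (c_uno : List Int) (c_dos : List Int) (acc : List Int) (p q : Int) : List Int :=
  if h : 0 < p ∧ 0 < q then
    let a := PySem.List.pyGetD c_uno (p-1) 0
    let b := PySem.List.pyGetD c_dos (q-1) 0
    if a = b then pvBgo c_uno c_dos (acc ++ [a]) (p-1) (q-1)
    else if a < b then pvBgo c_uno c_dos (acc ++ [b]) p (q-1)
    else pvBgo c_uno c_dos (acc ++ [a]) (p-1) q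
  else
    (if q ≤ 0 then
      (PySem.List.pyRange 0 p 1).foldl (fun c n => c ++ [PySem.List.pyGetD c_uno n 0]) []
     else
      (PySem.List.pyRange 0 q 1).foldl (fun c n => c ++ [PySem.List.pyGetD c_dos n 0]) [])
      ++ acc.reverse
termination_by p.toNat + q.toNat
decreasing_by all_goals omega

def recursiva_union_alt (c_uno : List Int) (i : Int) (c_dos : List Int) (j : Int) : List Int :=
  pvBgo c_uno c_dos [] i j

-- ===== PRECONDITION & SPEC =====
-- Pre_ excludes negative i/j (where A's empty-range / negative-index wraparound behaviour is accidental) and i/j beyond the list lengths (where A raises IndexError).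
def Pre_recursiva_union (c_uno : List Int) (i : Int) (c_dos : List Int) (j : Int) : Prop :=
  0 ≤ i ∧ i ≤ c_uno.length ∧ 0 ≤ j ∧ j ≤ c_dos.length
instance (c_uno : List Int) (i : Int) (c_dos : List Int) (j : Int) : Decidable (Pre_recursiva_union c_uno i c_dos j) := by unfold Pre_recursiva_union; infer_instance
def pvWitness_recursiva_union : List Int × Int × List Int × Int := ([1, 3], 2, [2, 3], 2)

def Spec_recursiva_union (c_uno : List Int) (i : Int) (c_dos : List Int) (j : Int) (out : List Int) : Prop := out = recursiva_union_alt c_uno i c_dos j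
instance (c_uno : List Int) (i : Int) (c_dos : List Int) (j : Int) (out : List Int) : Decidable (Spec_recursiva_union c_uno i c_dos j out) := by unfold Spec_recursiva_union; infer_instance

-- ===== CLAIM (what is proved, stated in full; the proofs are below) =====
def Claim_equal_recursiva_union : Prop := ∀ (c_uno : List Int) (i : Int) (c_dos : List Int) (j : Int), Dom_recursiva_union c_uno i c_dos j → Pre_recursiva_union c_uno i c_dos j → Spec_recursiva_union c_uno i c_dos j (recursiva_union c_uno i c_dos j)

-- ===== LEMMAS AND PROOFS =====

theorem pvMain (c1 c2 : List Int) :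
    ∀ (f : Nat) (i j : Int) (acc : List Int),
      0 ≤ i → i ≤ c1.length → 0 ≤ j → j ≤ c2.length → i.toNat + j.toNat < f →
      pvAgo f c1 i c2 j ++ acc.reverse = pvBgo c1 c2 acc i j := by
  intro f
  induction f with
  | zero => intro i j acc _ _ _ _ hf; omega
  | succ f ih =>
    intro i j acc hi0 hi1 hj0 hj1 hf
    rw [pvBgo]
    by_cases hj : j = 0
    · subst hj
      have : ¬ (0 < i ∧ (0:Int) < 0) := by omega
      rw [pvAgo]
      simp only [this, dif_neg, not_false_iff, if_pos (le_refl (0:Int))]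
      simp
    · by_cases hi : i = 0
      · subst hi
        have h1 : ¬ ((0:Int) < 0 ∧ 0 < j) := by omega
        have h2 : ¬ j ≤ 0 := by omega
        rw [pvAgo]
        simp only [if_neg hj, h1, dif_neg, not_false_iff, if_neg h2]
        simp
      · have hcond : 0 < i ∧ 0 < j := by omega
        rw [pvAgo]
        simp only [if_neg hj, if_neg hi, dif_pos hcond]
        set a := PySem.List.pyGetD c1 (i-1) 0 with ha
        set b := PySem.List.pyGetD c2 (j-1) 0 with hb
        by_cases heq : a = b
        · rw [if_pos heq, if_pos heq,
              ← ih (i-1) (j-1) (acc ++ [a]) (by omega) (by omega) (by omega) (by omega) (by omega)]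
          simp
        · rw [if_neg heq, if_neg heq]
          by_cases hlt : a < b
          · rw [if_pos hlt, if_pos hlt,
                ← ih i (j-1) (acc ++ [b]) (by omega) (by omega) (by omega) (by omega) (by omega)]
            simp
          · rw [if_neg hlt, if_neg hlt,
                ← ih (i-1) j (acc ++ [a]) (by omega) (by omega) (by omega) (by omega) (by omega)]
            simp

-- ===== VERDICT (by name: the statement is the Claim_ definition above) =====
theorem recursiva_union_spec : Claim_equal_recursiva_union := by
  intro c1 i c2 j _ hpre
  obtain ⟨hi0, hi1, hj0, hj1⟩ := hpre
  show recursiva_union c1 i c2 j = recursiva_union_alt c1 i c2 j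
  have := pvMain c1 c2 (i.toNat + j.toNat + 1) i j [] hi0 hi1 hj0 hj1 (by omega)
  simpa [recursiva_union, recursiva_union_alt] using this
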